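-- pv_equiv track=rewrite | github.com/EnesSakalliUniWien/BranchArchitect | notebooks/mobius_analyzer.py | calculate_mobius_function
-- ===== SOURCE A (Python) =====
-- import collections
-- from functools import lru_cache
-- from typing import Dict, Hashable, List
--
-- def calculate_mobius_function(
--     poset_covers: Dict[Hashable, List[Hashable]],
-- ) -> Dict[tuple[Hashable, Hashable], int]:
--     """
--     Calculates the Mobius function for all pairs (x, y) in a poset.
--
--     Args:
--         poset_covers: A dictionary representing the Hasse diagram of the poset.
--                       Keys are elements, values are the list of elements they cover.
--
--     Returns:
--         A dictionary where keys are tuples (x, y) and values are mu(x, y).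
--     """
--     elements = set(poset_covers.keys())
--     for children in poset_covers.values():
--         elements.update(children)
--
--     # Build a successor mapping (parent -> children) to find all elements >= x
--     successors = {el: set() for el in elements}
--     for parent, children in poset_covers.items():
--         for child in children:
--             successors[parent].add(child)
--
--     @lru_cache(maxsize=None)
--     def get_all_successors(node):
--         """Get all nodes reachable from a given node (reflexive)."""
--         all_succs = {node}
--         for succ in successors.get(node, []):
--             all_succs.update(get_all_successors(succ))
--         return all_succs
--
--     # Pre-calculate the full <= relation (the Zeta function)
--     # zeta[x] contains all y such that x <= y
--     zeta = {el: get_all_successors(el) for el in elements}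
--
--     memo = {}
--     sorted_elements = topological_sort(poset_covers)
--
--     for y in sorted_elements:
--         for x in sorted_elements:
--             # Condition for non-zero Mobius function is x <= y
--             if y not in zeta.get(x, set()):
--                 memo[(x, y)] = 0
--                 continue
--
--             if x == y:
--                 memo[(x, y)] = 1
--                 continue
--
--             # mu(x, y) = - sum(mu(x, z) for z where x <= z < y)
--             sum_val = 0
--             # Find all z such that x <= z < y
--             for z in zeta.get(x, set()):
--                 if z != y and y in zeta.get(z, set()):  # x <= z and z < y
--                     sum_val += memo.get((x, z), 0)
--
--             memo[(x, y)] = -sum_val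
--
--     return memo
--
-- def topological_sort(poset_covers: Dict[Hashable, List[Hashable]]) -> List[Hashable]:
--     """Performs a topological sort on the poset."""
--     elements = set(poset_covers.keys())
--     for children in poset_covers.values():
--         elements.update(children)
--
--     # Successor map for traversal
--     successors = {el: [] for el in elements}
--     for parent, children in poset_covers.items():
--         successors[parent].extend(children)
--
--     # In-degree for starting points
--     in_degree = {el: 0 for el in elements}
--     for children in poset_covers.values():
--         for child in children:
--             in_degree[child] += 1
--
--     queue = collections.deque([el for el in elements if in_degree[el] == 0])
--     sorted_list = []
--
--     while queue:
--         node = queue.popleft()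
--         sorted_list.append(node)
--
--         for neighbor in successors.get(node, []):
--             in_degree[neighbor] -= 1
--             if in_degree[neighbor] == 0:
--                 queue.append(neighbor)
--
--     if len(sorted_list) != len(elements):
--         raise ValueError("Poset has a cycle and cannot be topologically sorted.")
--     return sorted_list
-- ===== SOURCE B (Python) =====
-- import collections
--
--
-- def topological_sort(poset_covers):
--     """Performs a topological sort on the poset."""
--     elements = set(poset_covers.keys())
--     for children in poset_covers.values():
--         elements.update(children)
--
--     successors = {el: [] for el in elements}
--     for parent, children in poset_covers.items():
--         successors[parent].extend(children)
--
--     in_degree = {el: 0 for el in elements}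
--     for children in poset_covers.values():
--         for child in children:
--             in_degree[child] += 1
--
--     queue = collections.deque([el for el in elements if in_degree[el] == 0])
--     sorted_list = []
--
--     while queue:
--         node = queue.popleft()
--         sorted_list.append(node)
--         for neighbor in successors.get(node, []):
--             in_degree[neighbor] -= 1
--             if in_degree[neighbor] == 0:
--                 queue.append(neighbor)
--
--     if len(sorted_list) != len(elements):
--         raise ValueError("Poset has a cycle and cannot be topologically sorted.")
--     return sorted_list
--
--
-- def calculate_mobius_function(poset_covers):
--     order = topological_sort(poset_covers)
--
--     # Upward reachability (the <= relation) by a breadth-first search from each element.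
--     up = {}
--     for x in order:
--         seen = {x}
--         frontier = [x]
--         while frontier:
--             nxt = []
--             for u in frontier:
--                 for c in poset_covers.get(u, []):
--                     if c not in seen:
--                         seen.add(c)
--                         nxt.append(c)
--             frontier = nxt
--         up[x] = seen
--
--     # Moebius row of each x, stored sparsely over its up-set, filled in topological order.
--     rows = {}
--     for x in order:
--         row = {}
--         for y in order:
--             if y in up[x]:
--                 row[y] = 1 if x == y else -sum(v for z, v in row.items() if y in up[z])
--         rows[x] = row
--
--     return {(x, y): rows[x].get(y, 0) for y in order for x in order}
-- ===== Notes on version B (the rewrite author's own statement) =====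
-- stated objective: alternative
-- what changed: B replaces A's memoized recursive reachability and dense y-major pair-keyed memo (which scans the whole up-set with default-0 lookups for every pair) by an iterative per-element breadth-first up-set computation and x-major sparse Moebius rows that only store and sum entries inside each up-set, assembling the full grid in a final pass.
import Mathlib
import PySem

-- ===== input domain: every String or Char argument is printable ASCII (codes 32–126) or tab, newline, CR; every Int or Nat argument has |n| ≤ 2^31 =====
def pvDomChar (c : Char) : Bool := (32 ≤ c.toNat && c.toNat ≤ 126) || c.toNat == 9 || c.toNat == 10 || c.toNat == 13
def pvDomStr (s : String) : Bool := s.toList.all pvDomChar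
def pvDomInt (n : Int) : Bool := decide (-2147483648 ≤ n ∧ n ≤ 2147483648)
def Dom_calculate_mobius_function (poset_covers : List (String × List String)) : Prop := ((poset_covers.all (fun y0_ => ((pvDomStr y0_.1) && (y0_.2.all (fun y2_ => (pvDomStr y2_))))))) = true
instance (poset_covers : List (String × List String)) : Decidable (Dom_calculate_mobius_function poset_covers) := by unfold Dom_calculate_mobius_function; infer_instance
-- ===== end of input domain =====

-- B recomputes the Möbius values by per-element breadth-first up-sets and sparse per-row
-- dynamic programming (x-major) instead of A's memoized recursive zeta and dense y-major grid;
-- same return value (an alternative decomposition, not claimed faster).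

-- ===== PORT A =====
-- shared module helper: elements = set(keys); for children in values: elements.update(children)
def pvElems (d : PySem.Dict String (List String)) : PySem.Set String :=
  d.values.foldl (fun s cs => PySem.Set.update s cs) (PySem.Set.ofList d.keys)

-- topological_sort (module helper used by A and by Source B): Kahn's algorithm.
-- one queue step: decrement neighbour, enqueue it when its in-degree reaches 0
def pvKahnStep (st : List String × PySem.Dict String Int) (nb : String) :
    List String × PySem.Dict String Int :=
  let d' := st.2.modify nb 0 (· - 1)
  if d'.getD nb 0 == 0 then (st.1 ++ [nb], d') else (st.1, d')

-- the 'while queue' loop; fuel bounds the number of pops (≤ number of elements, each enqueued once)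
def pvKahnLoop (succ : PySem.Dict String (List String)) :
    Nat → List String → PySem.Dict String Int → List String → List String
  | 0, _, _, out => out
  | _ + 1, [], _, out => out
  | fuel + 1, node :: q, indeg, out =>
      let st := (succ.getD node []).foldl pvKahnStep (q, indeg)
      pvKahnLoop succ fuel st.1 st.2 (out ++ [node])

-- the raise on a cycle is not represented: Pre_ excludes cyclic inputs
def topological_sort (pc : List (String × List String)) : List String :=
  let d := PySem.Dict.ofList pc
  let elements := pvElems d
  let succ := d.items.foldl (fun m p => m.modify p.1 [] (· ++ p.2))
      (elements.foldl (fun m el => m.insert el ([] : List String)) PySem.Dict.empty)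
  let indeg := d.values.foldl (fun m cs => cs.foldl (fun m c => m.modify c 0 (· + 1)) m)
      (elements.foldl (fun m el => m.insert el (0 : Int)) PySem.Dict.empty)
  let queue := elements.filter (fun el => indeg.getD el 0 == 0)
  pvKahnLoop succ elements.length queue indeg []

-- get_all_successors: Python's unbounded memoized recursion, with fuel = number of elements
-- (enough on every acyclic input, the only ones Pre_ admits)
def pvGas (succ : PySem.Dict String (PySem.Set String)) : Nat → String → PySem.Set String
  | 0, node => [node]
  | fuel + 1, node =>
      (succ.getD node []).foldl (fun acc c => PySem.Set.update acc (pvGas succ fuel c)) [node]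

def calculate_mobius_function (poset_covers : List (String × List String)) :
    List (String × String × Int) :=
  let d := PySem.Dict.ofList poset_covers
  let elements := pvElems d
  let succ := d.items.foldl (fun m p =>
        p.2.foldl (fun m c => m.modify p.1 [] (fun s => PySem.Set.add s c)) m)
      (elements.foldl (fun m el => m.insert el (PySem.Set.empty : PySem.Set String)) PySem.Dict.empty)
  let zeta := elements.foldl (fun m el => m.insert el (pvGas succ elements.length el)) PySem.Dict.empty
  let S := topological_sort poset_covers
  let memo := S.foldl (fun m y => S.foldl (fun m x =>
      if !PySem.Set.contains (zeta.getD x []) y then m.insert (x, y) 0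
      else if x == y then m.insert (x, y) 1
      else
        m.insert (x, y) (-((zeta.getD x []).foldl (fun s z =>
          if z != y && PySem.Set.contains (zeta.getD z []) y then s + m.getD (x, z) 0 else s)
            (0 : Int)))) m) PySem.Dict.empty
  memo.items.map (fun p => (p.1.1, p.1.2, p.2))

-- ===== PORT B =====
-- one round of the breadth-first search: scan the frontier, collect unseen children
def pvBfsRound (d : PySem.Dict String (List String))
    (st : PySem.Set String × List String) : PySem.Set String × List String :=
  st.2.foldl (fun st u => (d.getD u []).foldl (fun st c =>
      if PySem.Set.contains st.1 c then st else (st.1 ++ [c], st.2 ++ [c])) st) (st.1, [])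

-- the 'while frontier' loop, fuel = number of elements (rounds are BFS levels)
def pvBfs (d : PySem.Dict String (List String)) :
    Nat → PySem.Set String × List String → PySem.Set String
  | 0, st => st.1
  | fuel + 1, st => if st.2.isEmpty then st.1 else pvBfs d fuel (pvBfsRound d st)

-- sum(v for z, v in row.items() if y in up[z])
def pvRowSum (up : PySem.Dict String (PySem.Set String)) (y : String)
    (row : PySem.Dict String Int) : Int :=
  row.items.foldl (fun s zv => if PySem.Set.contains (up.getD zv.1 []) y then s + zv.2 else s) 0

-- body of B's inner loop: extend the sparse Möbius row of x by y
def pvRowStep (up : PySem.Dict String (PySem.Set String)) (x : String)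
    (row : PySem.Dict String Int) (y : String) : PySem.Dict String Int :=
  if PySem.Set.contains (up.getD x []) y then
    row.insert y (if x == y then 1 else -(pvRowSum up y row))
  else row

def calculate_mobius_function_alt (poset_covers : List (String × List String)) :
    List (String × String × Int) :=
  let d := PySem.Dict.ofList poset_covers
  let order := topological_sort poset_covers
  let fuel := (pvElems d).length
  let up := order.foldl (fun m x => m.insert x (pvBfs d fuel ([x], [x]))) PySem.Dict.empty
  let rows := order.foldl (fun rs x =>
      rs.insert x (order.foldl (pvRowStep up x) PySem.Dict.empty)) PySem.Dict.empty
  let res := order.foldl (fun m y => order.foldl (fun m x =>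
      m.insert (x, y) ((rows.getD x PySem.Dict.empty).getD y 0)) m) PySem.Dict.empty
  res.items.map (fun p => (p.1.1, p.1.2, p.2))

-- ===== PRECONDITION & SPEC =====
-- y is reachable from x along cover edges in at most `fuel` steps
def pvReachB (d : PySem.Dict String (List String)) : Nat → String → String → Bool
  | 0, x, y => y == x
  | fuel + 1, x, y => y == x || (d.getD x []).any (fun c => pvReachB d fuel c y)

-- Pre_ excludes exactly the inputs whose cover relation has a directed cycle: there Python's A
-- raises (RecursionError in get_all_successors, or ValueError in topological_sort).
def Pre_calculate_mobius_function (poset_covers : List (String × List String)) : Prop :=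
  ∀ p ∈ (PySem.Dict.ofList poset_covers).items, ∀ c ∈ p.2,
    pvReachB (PySem.Dict.ofList poset_covers)
      (pvElems (PySem.Dict.ofList poset_covers)).length c p.1 = false
instance (poset_covers : List (String × List String)) :
    Decidable (Pre_calculate_mobius_function poset_covers) := by
  unfold Pre_calculate_mobius_function; infer_instance

def pvWitness_calculate_mobius_function : (List (String × List String)) :=
  [("a", ["b"]), ("b", [])]

def Spec_calculate_mobius_function (poset_covers : List (String × List String))
    (out : List (String × String × Int)) : Prop :=
  out = calculate_mobius_function_alt poset_covers
instance (poset_covers : List (String × List String)) (out : List (String × String × Int)) :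
    Decidable (Spec_calculate_mobius_function poset_covers out) := by
  unfold Spec_calculate_mobius_function; infer_instance

-- ===== CLAIM (what is proved, stated in full; the proofs are below) =====
def Claim_equal_calculate_mobius_function : Prop :=
  ∀ (poset_covers : List (String × List String)), Dom_calculate_mobius_function poset_covers →
    Pre_calculate_mobius_function poset_covers →
    Spec_calculate_mobius_function poset_covers (calculate_mobius_function poset_covers)

-- ===== LEMMAS AND PROOFS =====

-- generic: membership in a fold of Set.update
theorem pv_mem_foldl_update {α β : Type} [BEq α] [LawfulBEq α] (l : List β) (f : β → List α)
    (s : PySem.Set α) (y : α) :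
    (y ∈ l.foldl (fun s b => PySem.Set.update s (f b)) s) ↔ y ∈ s ∨ ∃ b ∈ l, y ∈ f b := by
  induction l generalizing s with
  | nil => simp
  | cons a t ih =>
    simp only [List.foldl_cons, ih, PySem.Set.mem_update, List.mem_cons]
    constructor
    · rintro ((h | h) | ⟨b, hb, h⟩)
      · exact Or.inl h
      · exact Or.inr ⟨a, Or.inl rfl, h⟩
      · exact Or.inr ⟨b, Or.inr hb, h⟩
    · rintro (h | ⟨b, (rfl | hb), h⟩)
      · exact Or.inl (Or.inl h)
      · exact Or.inl (Or.inr h)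
      · exact Or.inr ⟨b, hb, h⟩

theorem pv_nodup_foldl_update {α β : Type} [BEq α] [LawfulBEq α] (l : List β) (f : β → List α)
    (s : PySem.Set α) (hs : s.Nodup) :
    (l.foldl (fun s b => PySem.Set.update s (f b)) s).Nodup := by
  induction l generalizing s with
  | nil => exact hs
  | cons a t ih => exact ih _ (PySem.Set.nodup_update s (f a) hs)

theorem pv_mem_pvElems (d : PySem.Dict String (List String)) (x : String) :
    x ∈ pvElems d ↔ x ∈ d.keys ∨ ∃ cs ∈ d.values, x ∈ cs := by
  unfold pvElems
  rw [pv_mem_foldl_update d.values (fun cs => cs) _ x, PySem.Set.mem_ofList]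

theorem pv_nodup_pvElems (d : PySem.Dict String (List String)) : (pvElems d).Nodup :=
  pv_nodup_foldl_update _ _ _ (PySem.Set.nodup_ofList _)

-- generic: getD after a fold inserting a value that depends only on the key
theorem pv_getD_foldl_insert_fn {ν : Type} (l : List String) (f : String → ν)
    (m0 : PySem.Dict String ν) (u : String) (dflt : ν) :
    (l.foldl (fun m x => m.insert x (f x)) m0).getD u dflt
      = if u ∈ l then f u else m0.getD u dflt := by
  induction l generalizing m0 with
  | nil => simp
  | cons a t ih =>
    simp only [List.foldl_cons, ih, PySem.Dict.getD_insert, List.mem_cons]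
    by_cases h1 : u ∈ t <;> by_cases h2 : u = a <;> simp [h1, h2]

-- generic: turning an accumulate-if loop into a sum over a filter
theorem pv_foldl_if_add {α : Type} (l : List α) (p : α → Bool) (g : α → Int) (a : Int) :
    l.foldl (fun s z => if p z then s + g z else s) a = a + ((l.filter p).map g).sum := by
  induction l generalizing a with
  | nil => simp
  | cons b t ih =>
    simp only [List.foldl_cons, List.filter_cons]
    by_cases h : p b
    · simp only [h, if_true, ih, List.map_cons, List.sum_cons]; ring
    · simp only [h, ih]; simp

theorem pv_sum_map_eq_of_mem_iff {α : Type} [DecidableEq α] (l₁ l₂ : List α) (g : α → Int)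
    (h1 : l₁.Nodup) (h2 : l₂.Nodup) (h : ∀ z, z ∈ l₁ ↔ z ∈ l₂) :
    (l₁.map g).sum = (l₂.map g).sum :=
  (((List.perm_ext_iff_of_nodup h1 h2).2 h).map g).sum_eq


theorem pv_reach_refl (d : PySem.Dict String (List String)) (f : Nat) (x : String) :
    pvReachB d f x x = true := by
  cases f <;> simp [pvReachB]

theorem pv_reach_succ (d : PySem.Dict String (List String)) (f : Nat) (x y : String) :
    pvReachB d (f + 1) x y = true ↔ y = x ∨ ∃ c ∈ d.getD x [], pvReachB d f c y = true := by
  simp [pvReachB]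

theorem pv_reach_zero (d : PySem.Dict String (List String)) (x y : String) :
    pvReachB d 0 x y = true ↔ y = x := by
  simp [pvReachB]

theorem pv_reach_mono (d : PySem.Dict String (List String)) (f : Nat) (x y : String)
    (h : pvReachB d f x y = true) : pvReachB d (f + 1) x y = true := by
  induction f generalizing x with
  | zero => rw [pv_reach_zero] at h; rw [pv_reach_succ]; exact Or.inl h
  | succ f ih =>
    rw [pv_reach_succ] at h; rw [pv_reach_succ]
    rcases h with h | ⟨c, hc, h⟩
    · exact Or.inl h
    · exact Or.inr ⟨c, hc, ih c h⟩

theorem pv_reach_snoc (d : PySem.Dict String (List String)) (f : Nat) (x y : String) :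
    pvReachB d (f + 1) x y = true ↔
      pvReachB d f x y = true ∨ ∃ u, pvReachB d f x u = true ∧ y ∈ d.getD u [] := by
  induction f generalizing x with
  | zero =>
    rw [pv_reach_succ, pv_reach_zero]
    constructor
    · rintro (h | ⟨c, hc, h⟩)
      · exact Or.inl h
      · rw [pv_reach_zero] at h; subst h; exact Or.inr ⟨x, pv_reach_refl d 0 x, hc⟩
    · rintro (h | ⟨u, hu, h⟩)
      · exact Or.inl h
      · rw [pv_reach_zero] at hu
        exact Or.inr ⟨y, hu ▸ h, (pv_reach_zero d y y).2 rfl⟩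
  | succ f ih =>
    rw [pv_reach_succ]
    constructor
    · rintro (h | ⟨c, hc, h⟩)
      · exact Or.inl (by rw [h]; exact pv_reach_refl d _ x)
      · rcases (ih c).1 h with h' | ⟨u, hu, hyu⟩
        · exact Or.inl ((pv_reach_succ d f x y).2 (Or.inr ⟨c, hc, h'⟩))
        · exact Or.inr ⟨u, (pv_reach_succ d f x u).2 (Or.inr ⟨c, hc, hu⟩), hyu⟩
    · rintro (h | ⟨u, hu, hyu⟩)
      · exact (pv_reach_succ d (f + 1) x y).1 (pv_reach_mono d _ x y h)
      · rcases (pv_reach_succ d f x u).1 hu with h' | ⟨c, hc, h'⟩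
        · subst h'
          exact Or.inr ⟨y, hyu, pv_reach_refl d _ y⟩
        · exact Or.inr ⟨c, hc, (ih c).2 (Or.inr ⟨u, h', hyu⟩)⟩

-- membership through the 'extend' loop building topological_sort's successor lists
theorem pv_getD_foldl_extend (ps : List (String × List String))
    (m0 : PySem.Dict String (List String)) (u x : String) :
    (x ∈ (ps.foldl (fun m p => m.modify p.1 [] (· ++ p.2)) m0).getD u []) ↔
      x ∈ m0.getD u [] ∨ ∃ p ∈ ps, p.1 = u ∧ x ∈ p.2 := by
  induction ps generalizing m0 with
  | nil => simp
  | cons a t ih =>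
    simp only [List.foldl_cons, ih]
    by_cases h : u = a.1
    · subst h; rw [PySem.Dict.getD_modify_self]
      simp only [List.mem_append, List.mem_cons]
      constructor
      · rintro ((h | h) | ⟨p, hp, h1, h2⟩)
        · exact Or.inl h
        · exact Or.inr ⟨a, Or.inl rfl, rfl, h⟩
        · exact Or.inr ⟨p, Or.inr hp, h1, h2⟩
      · rintro (h | ⟨p, (rfl | hp), h1, h2⟩)
        · exact Or.inl (Or.inl h)
        · exact Or.inl (Or.inr h2)
        · exact Or.inr ⟨p, hp, h1, h2⟩
    · rw [PySem.Dict.getD_modify_of_ne _ _ _ h]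
      simp only [List.mem_cons]
      constructor
      · rintro (h' | ⟨p, hp, h1, h2⟩)
        · exact Or.inl h'
        · exact Or.inr ⟨p, Or.inr hp, h1, h2⟩
      · rintro (h' | ⟨p, (rfl | hp), h1, h2⟩)
        · exact Or.inl h'
        · exact absurd h1.symm h
        · exact Or.inr ⟨p, hp, h1, h2⟩

-- membership through the inner 'add' loop building A's successor sets
theorem pv_getD_foldl_add (cs : List String) (k : String)
    (m : PySem.Dict String (PySem.Set String)) (u x : String) :
    (x ∈ (cs.foldl (fun m c => m.modify k [] (fun s => PySem.Set.add s c)) m).getD u []) ↔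
      x ∈ m.getD u [] ∨ (u = k ∧ x ∈ cs) := by
  induction cs generalizing m with
  | nil => simp
  | cons c t ih =>
    simp only [List.foldl_cons, ih]
    by_cases h : u = k
    · subst h
      rw [PySem.Dict.getD_modify_self, PySem.Set.mem_add]
      simp only [List.mem_cons]; tauto
    · rw [PySem.Dict.getD_modify_of_ne _ _ _ h]
      simp only [List.mem_cons]; tauto

theorem pv_getD_foldl_add_outer (ps : List (String × List String))
    (m0 : PySem.Dict String (PySem.Set String)) (u x : String) :
    (x ∈ (ps.foldl (fun m p =>
        p.2.foldl (fun m c => m.modify p.1 [] (fun s => PySem.Set.add s c)) m) m0).getD u []) ↔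
      x ∈ m0.getD u [] ∨ ∃ p ∈ ps, p.1 = u ∧ x ∈ p.2 := by
  induction ps generalizing m0 with
  | nil => simp
  | cons a t ih =>
    simp only [List.foldl_cons, ih, pv_getD_foldl_add, List.mem_cons]
    constructor
    · rintro ((h | ⟨rfl, h⟩) | ⟨p, hp, h1, h2⟩)
      · exact Or.inl h
      · exact Or.inr ⟨a, Or.inl rfl, rfl, h⟩
      · exact Or.inr ⟨p, Or.inr hp, h1, h2⟩
    · rintro (h | ⟨p, (rfl | hp), h1, h2⟩)
      · exact Or.inl (Or.inl h)
      · exact Or.inl (Or.inr ⟨h1.symm, h2⟩)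
      · exact Or.inr ⟨p, hp, h1, h2⟩

-- items with first component u, in a dict with unique keys, carry exactly d.getD u []
theorem pv_items_fst_getD (d : PySem.Dict String (List String)) (hnd : d.keys.Nodup)
    (u x : String) :
    (∃ p ∈ d.items, p.1 = u ∧ x ∈ p.2) ↔ x ∈ d.getD u [] := by
  constructor
  · rintro ⟨⟨k, v⟩, hp, rfl, hx⟩
    rw [PySem.Dict.getD_of_mem_items _ hp hnd]; exact hx
  · intro hx
    rcases h : d.get? u with _ | cs
    · rw [PySem.Dict.getD_eq_get?_getD, h] at hx; simp at hx
    · rw [PySem.Dict.getD_eq_get?_getD, h] at hx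
      exact ⟨(u, cs), PySem.Dict.mem_items_of_get?_eq_some d h, rfl, hx⟩

-- proof-side names for the ports' let-bound values
def pvD (pc : List (String × List String)) : PySem.Dict String (List String) :=
  PySem.Dict.ofList pc
def pvE (pc : List (String × List String)) : PySem.Set String := pvElems (pvD pc)
def pvN (pc : List (String × List String)) : Nat := (pvE pc).length
def pvSuccS (pc : List (String × List String)) : PySem.Dict String (PySem.Set String) :=
  (pvD pc).items.foldl (fun m p =>
      p.2.foldl (fun m c => m.modify p.1 [] (fun s => PySem.Set.add s c)) m)
    ((pvE pc).foldl (fun m el => m.insert el (PySem.Set.empty : PySem.Set String)) PySem.Dict.empty)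
def pvZeta (pc : List (String × List String)) : PySem.Dict String (PySem.Set String) :=
  (pvE pc).foldl (fun m el => m.insert el (pvGas (pvSuccS pc) (pvN pc) el)) PySem.Dict.empty
def pvS (pc : List (String × List String)) : List String := topological_sort pc
def pvUp (pc : List (String × List String)) : PySem.Dict String (PySem.Set String) :=
  (pvS pc).foldl (fun m x => m.insert x (pvBfs (pvD pc) (pvN pc) ([x], [x]))) PySem.Dict.empty

theorem pv_children_sub_elems (pc : List (String × List String)) (u c : String)
    (h : c ∈ (pvD pc).getD u []) : c ∈ pvE pc := by
  rw [PySem.Dict.getD_eq_get?_getD] at h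
  rcases hg : (pvD pc).get? u with _ | cs
  · rw [hg] at h; simp at h
  · rw [hg] at h
    refine (pv_mem_pvElems _ c).2 (Or.inr ⟨cs, ?_, h⟩)
    have := PySem.Dict.mem_items_of_get?_eq_some (pvD pc) hg
    simp only [PySem.Dict.values]
    exact List.mem_map.2 ⟨(u, cs), this, rfl⟩

theorem pv_succS_mem (pc : List (String × List String)) (u c : String) :
    c ∈ (pvSuccS pc).getD u [] ↔ c ∈ (pvD pc).getD u [] := by
  unfold pvSuccS
  rw [pv_getD_foldl_add_outer, pv_items_fst_getD (pvD pc) (by unfold pvD; exact PySem.Dict.nodup_keys_ofList pc)]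
  rw [pv_getD_foldl_insert_fn (pvE pc) (fun _ => (PySem.Set.empty : PySem.Set String))]
  simp [PySem.Set.empty]

theorem pv_succT_mem (pc : List (String × List String)) (u c : String) :
    c ∈ ((pvD pc).items.foldl (fun m p => m.modify p.1 [] (· ++ p.2))
        ((pvE pc).foldl (fun m el => m.insert el ([] : List String)) PySem.Dict.empty)).getD u []
      ↔ c ∈ (pvD pc).getD u [] := by
  rw [pv_getD_foldl_extend, pv_items_fst_getD (pvD pc) (by unfold pvD; exact PySem.Dict.nodup_keys_ofList pc)]
  rw [pv_getD_foldl_insert_fn (pvE pc) (fun _ => ([] : List String))]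
  simp

theorem pv_gas_mem (pc : List (String × List String)) (f : Nat) (x y : String) :
    y ∈ pvGas (pvSuccS pc) f x ↔ pvReachB (pvD pc) f x y = true := by
  induction f generalizing x with
  | zero => rw [pv_reach_zero]; simp [pvGas]
  | succ f ih =>
    show y ∈ ((pvSuccS pc).getD x []).foldl
        (fun acc c => PySem.Set.update acc (pvGas (pvSuccS pc) f c)) [x] ↔ _
    rw [pv_mem_foldl_update, pv_reach_succ]
    simp only [List.mem_singleton]
    constructor
    · rintro (h | ⟨c, hc, h⟩)
      · exact Or.inl h
      · exact Or.inr ⟨c, (pv_succS_mem pc x c).1 hc, (ih c).1 h⟩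
    · rintro (h | ⟨c, hc, h⟩)
      · exact Or.inl h
      · exact Or.inr ⟨c, (pv_succS_mem pc x c).2 hc, (ih c).2 h⟩

theorem pv_nodup_gas (pc : List (String × List String)) (f : Nat) (x : String) :
    (pvGas (pvSuccS pc) f x).Nodup := by
  cases f with
  | zero => simp [pvGas]
  | succ f =>
    show (((pvSuccS pc).getD x []).foldl
        (fun acc c => PySem.Set.update acc (pvGas (pvSuccS pc) f c)) [x]).Nodup
    exact pv_nodup_foldl_update _ _ _ (by simp)

-- one inner BFS step list: adding the unseen children of one frontier node
theorem pv_bfs_inner (cs : List String)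
    (st : PySem.Set String × List String) (z : String) :
    (z ∈ (cs.foldl (fun st c =>
        if PySem.Set.contains st.1 c then st else (st.1 ++ [c], st.2 ++ [c])) st).1
      ↔ z ∈ st.1 ∨ z ∈ cs) ∧
    (z ∈ (cs.foldl (fun st c =>
        if PySem.Set.contains st.1 c then st else (st.1 ++ [c], st.2 ++ [c])) st).2
      ↔ z ∈ st.2 ∨ (z ∈ cs ∧ z ∉ st.1)) := by
  induction cs generalizing st with
  | nil => simp
  | cons c t ih =>
    simp only [List.foldl_cons]
    by_cases h : PySem.Set.contains st.1 c = true
    · rw [if_pos h]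
      have hc : c ∈ st.1 := (PySem.Set.contains_iff _ _).1 h
      rcases ih st with ⟨ih1, ih2⟩
      refine ⟨ih1.trans ?_, ih2.trans ?_⟩ <;> simp only [List.mem_cons] <;> constructor
      · rintro (h1 | h1); exacts [Or.inl h1, Or.inr (Or.inr h1)]
      · rintro (h1 | (rfl | h1)); exacts [Or.inl h1, Or.inl hc, Or.inr h1]
      · rintro (h1 | ⟨h1, h2⟩); exacts [Or.inl h1, Or.inr ⟨Or.inr h1, h2⟩]
      · rintro (h1 | ⟨(rfl | h1), h2⟩); exacts [Or.inl h1, absurd hc h2, Or.inr ⟨h1, h2⟩]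
    · rw [if_neg h]
      have hc : c ∉ st.1 := fun hm => h ((PySem.Set.contains_iff _ _).2 hm)
      rcases ih (st.1 ++ [c], st.2 ++ [c]) with ⟨ih1, ih2⟩
      simp only [List.mem_append, List.mem_singleton] at ih1 ih2
      refine ⟨ih1.trans ?_, ih2.trans ?_⟩ <;> simp only [List.mem_cons] <;> constructor
      · rintro ((h1 | rfl) | h1); exacts [Or.inl h1, Or.inr (Or.inl rfl), Or.inr (Or.inr h1)]
      · rintro (h1 | (rfl | h1)); exacts [Or.inl (Or.inl h1), Or.inl (Or.inr rfl), Or.inr h1]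
      · rintro ((h1 | rfl) | ⟨h1, h2⟩)
        exacts [Or.inl h1, Or.inr ⟨Or.inl rfl, hc⟩, Or.inr ⟨Or.inr h1, fun hm => h2 (Or.inl hm)⟩]
      · rintro (h1 | ⟨(rfl | h1), h2⟩)
        · exact Or.inl (Or.inl h1)
        · exact Or.inl (Or.inr rfl)
        · by_cases hzc : z = c
          · exact Or.inl (Or.inr hzc)
          · refine Or.inr ⟨h1, ?_⟩
            rintro (hm | hm); exacts [h2 hm, hzc hm]

theorem pv_reach_mono_le (d : PySem.Dict String (List String)) (f m : Nat) (x y : String)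
    (h : pvReachB d f x y = true) : pvReachB d (f + m) x y = true := by
  induction m with
  | zero => exact h
  | succ m ih => exact pv_reach_mono d (f + m) x y ih

-- one BFS round over the whole frontier (generalized over the nxt accumulator)
theorem pv_bfs_round_gen (d : PySem.Dict String (List String)) (us : List String)
    (seen : PySem.Set String) (acc : List String) (z : String) :
    (z ∈ (us.foldl (fun st u => (d.getD u []).foldl (fun st c =>
        if PySem.Set.contains st.1 c then st else (st.1 ++ [c], st.2 ++ [c])) st) (seen, acc)).1
      ↔ z ∈ seen ∨ ∃ u ∈ us, z ∈ d.getD u []) ∧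
    (z ∈ (us.foldl (fun st u => (d.getD u []).foldl (fun st c =>
        if PySem.Set.contains st.1 c then st else (st.1 ++ [c], st.2 ++ [c])) st) (seen, acc)).2
      ↔ z ∈ acc ∨ (z ∉ seen ∧ ∃ u ∈ us, z ∈ d.getD u [])) := by
  induction us generalizing seen acc with
  | nil => simp
  | cons u t ih =>
    simp only [List.foldl_cons]
    rcases pv_bfs_inner (d.getD u []) (seen, acc) z with ⟨h1, h2⟩
    have hst : ((d.getD u []).foldl (fun st c =>
        if PySem.Set.contains st.1 c then st else (st.1 ++ [c], st.2 ++ [c])) (seen, acc))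
        = (((d.getD u []).foldl _ (seen, acc)).1, ((d.getD u []).foldl _ (seen, acc)).2) := rfl
    rcases ih ((d.getD u []).foldl (fun st c =>
        if PySem.Set.contains st.1 c then st else (st.1 ++ [c], st.2 ++ [c])) (seen, acc)).1
      ((d.getD u []).foldl (fun st c =>
        if PySem.Set.contains st.1 c then st else (st.1 ++ [c], st.2 ++ [c])) (seen, acc)).2
      with ⟨ih1, ih2⟩
    rw [hst]
    constructor
    · rw [ih1, h1]
      simp only [List.mem_cons]
      constructor
      · rintro ((hz | hz) | ⟨u', hu', hz⟩)
        exacts [Or.inl hz, Or.inr ⟨u, Or.inl rfl, hz⟩, Or.inr ⟨u', Or.inr hu', hz⟩]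
      · rintro (hz | ⟨u', (rfl | hu'), hz⟩)
        exacts [Or.inl (Or.inl hz), Or.inl (Or.inr hz), Or.inr ⟨u', hu', hz⟩]
    · rw [ih2, h2, h1]
      simp only [List.mem_cons]
      constructor
      · rintro ((hz | ⟨hz, hns⟩) | ⟨hns, u', hu', hz⟩)
        · exact Or.inl hz
        · exact Or.inr ⟨hns, u, Or.inl rfl, hz⟩
        · exact Or.inr ⟨fun hm => hns (Or.inl hm), u', Or.inr hu', hz⟩
      · rintro (hz | ⟨hns, u', (rfl | hu'), hz⟩)
        · exact Or.inl (Or.inl hz)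
        · exact Or.inl (Or.inr ⟨hz, hns⟩)
        · by_cases hz1 : z ∈ seen ∨ z ∈ d.getD u []
          · rcases hz1 with hz1 | hz1
            · exact absurd hz1 hns
            · exact Or.inl (Or.inr ⟨hz1, hns⟩)
          · exact Or.inr ⟨hz1, u', hu', hz⟩

theorem pv_bfs_round_spec (d : PySem.Dict String (List String))
    (st : PySem.Set String × List String) (z : String) :
    (z ∈ (pvBfsRound d st).1 ↔ z ∈ st.1 ∨ ∃ u ∈ st.2, z ∈ d.getD u []) ∧
    (z ∈ (pvBfsRound d st).2 ↔ z ∉ st.1 ∧ ∃ u ∈ st.2, z ∈ d.getD u []) := by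
  have := pv_bfs_round_gen d st.2 st.1 [] z
  simpa [pvBfsRound] using this

theorem pv_bfs_loop (d : PySem.Dict String (List String)) (x : String) :
    ∀ (f k : Nat) (st : PySem.Set String × List String),
      (∀ z ∈ st.2, z ∈ st.1) →
      (∀ u ∈ st.1, u ∉ st.2 → ∀ c ∈ d.getD u [], c ∈ st.1) →
      (∀ z, z ∈ st.1 ↔ pvReachB d k x z = true) →
      ∀ z, z ∈ pvBfs d f st ↔ pvReachB d (k + f) x z = true := by
  intro f
  induction f with
  | zero => intro k st _ _ h3 z; exact h3 z
  | succ f ih =>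
    intro k st h1 h2 h3 z
    have hunf : pvBfs d (f + 1) st
        = if st.2.isEmpty then st.1 else pvBfs d f (pvBfsRound d st) := rfl
    rw [hunf]
    by_cases hemp : st.2.isEmpty
    · rw [if_pos hemp]
      rw [List.isEmpty_iff] at hemp
      have hcl : ∀ m w, pvReachB d (k + m) x w = true → w ∈ st.1 := by
        intro m
        induction m with
        | zero => intro w hw; exact (h3 w).2 hw
        | succ m ihm =>
          intro w hw
          rcases (pv_reach_snoc d (k + m) x w).1 hw with hw | ⟨u, hu, hcw⟩
          · exact ihm w hw
          · exact h2 u (ihm u hu) (by rw [hemp]; simp) w hcw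
      constructor
      · intro hz
        exact pv_reach_mono_le d k (f + 1) x z ((h3 z).1 hz)
      · intro hz
        exact hcl (f + 1) z hz
    · rw [if_neg hemp]
      have key := ih (k + 1) (pvBfsRound d st) ?_ ?_ ?_ z
      · rw [key]
        have : k + 1 + f = k + (f + 1) := by omega
        rw [this]
      · intro w hw
        rcases (pv_bfs_round_spec d st w).2.1 hw with ⟨hns, hex⟩
        exact ((pv_bfs_round_spec d st w).1).2 (Or.inr hex)
      · intro u hu hnq c hc
        rcases (pv_bfs_round_spec d st u).1.1 hu with hu1 | hex
        · by_cases huq : u ∈ st.2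
          · exact ((pv_bfs_round_spec d st c).1).2 (Or.inr ⟨u, huq, hc⟩)
          · exact ((pv_bfs_round_spec d st c).1).2 (Or.inl (h2 u hu1 huq c hc))
        · by_cases hu1 : u ∈ st.1
          · by_cases huq : u ∈ st.2
            · exact ((pv_bfs_round_spec d st c).1).2 (Or.inr ⟨u, huq, hc⟩)
            · exact ((pv_bfs_round_spec d st c).1).2 (Or.inl (h2 u hu1 huq c hc))
          · exact absurd (((pv_bfs_round_spec d st u).2).2 ⟨hu1, hex⟩) hnq
      · intro w
        rw [(pv_bfs_round_spec d st w).1, pv_reach_snoc]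
        constructor
        · rintro (hw | ⟨u, hu, hcw⟩)
          · exact Or.inl ((h3 w).1 hw)
          · exact Or.inr ⟨u, (h3 u).1 (h1 u hu), hcw⟩
        · rintro (hw | ⟨u, hu, hcw⟩)
          · exact Or.inl ((h3 w).2 hw)
          · have hu1 : u ∈ st.1 := (h3 u).2 hu
            by_cases huq : u ∈ st.2
            · exact Or.inr ⟨u, huq, hcw⟩
            · exact Or.inl (h2 u hu1 huq w hcw)

theorem pv_up_mem (pc : List (String × List String)) (x : String) (hx : x ∈ pvS pc) (y : String) :
    y ∈ (pvUp pc).getD x [] ↔ pvReachB (pvD pc) (pvN pc) x y = true := by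
  unfold pvUp
  rw [pv_getD_foldl_insert_fn, if_pos hx]
  have := pv_bfs_loop (pvD pc) x (pvN pc) 0 ([x], [x])
    (by intro z hz; exact hz)
    (by
      intro u hu hnu
      simp only [List.mem_singleton] at hu hnu
      exact absurd hu hnu)
    (by intro z; simp [pv_reach_zero]) y
  simpa using this

theorem pv_zeta_mem (pc : List (String × List String)) (x : String) (hx : x ∈ pvE pc)
    (y : String) :
    y ∈ (pvZeta pc).getD x [] ↔ pvReachB (pvD pc) (pvN pc) x y = true := by
  unfold pvZeta
  rw [pv_getD_foldl_insert_fn, if_pos hx]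
  exact pv_gas_mem pc (pvN pc) x y

theorem pv_nodup_zeta (pc : List (String × List String)) (x : String) :
    ((pvZeta pc).getD x []).Nodup := by
  unfold pvZeta
  rw [pv_getD_foldl_insert_fn]
  by_cases hx : x ∈ pvE pc
  · rw [if_pos hx]; exact pv_nodup_gas pc (pvN pc) x
  · rw [if_neg hx]; simp

theorem pv_kahn_inner (cs : List String) (out q : List String) (P : List String)
    (indeg : PySem.Dict String Int)
    (hnd : (out ++ q).Nodup) (hle : ∀ v ∈ out ++ q, indeg.getD v 0 ≤ 0)
    (hqP : ∀ v ∈ q, v ∈ P) (hcs : ∀ c ∈ cs, c ∈ P) :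
    (out ++ (cs.foldl pvKahnStep (q, indeg)).1).Nodup ∧
    (∀ v ∈ out ++ (cs.foldl pvKahnStep (q, indeg)).1,
        (cs.foldl pvKahnStep (q, indeg)).2.getD v 0 ≤ 0) ∧
    (∀ v ∈ (cs.foldl pvKahnStep (q, indeg)).1, v ∈ P) := by
  induction cs generalizing q indeg with
  | nil => exact ⟨hnd, hle, hqP⟩
  | cons nb t ihc =>
    simp only [List.foldl_cons]
    have hmod : (indeg.modify nb 0 (· - 1)).getD nb 0 = indeg.getD nb 0 - 1 :=
      PySem.Dict.getD_modify_self _ _ _ _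
    by_cases hcond : (indeg.modify nb 0 (· - 1)).getD nb 0 == 0
    · have hstep : pvKahnStep (q, indeg) nb
          = (q ++ [nb], indeg.modify nb 0 (· - 1)) := by
        simp only [pvKahnStep]; rw [if_pos hcond]
      rw [hstep]
      have hzero : (indeg.modify nb 0 (· - 1)).getD nb 0 = 0 := by
        rwa [beq_iff_eq] at hcond
      have hfresh : nb ∉ out ++ q := by
        intro hmem
        have := hle nb hmem
        omega
      refine ihc (q ++ [nb]) _ ?_ ?_ ?_ (fun c hc => hcs c (List.mem_cons_of_mem nb hc))
      · rw [← List.append_assoc, List.nodup_append]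
        refine ⟨hnd, List.nodup_singleton nb, ?_⟩
        intro a ha b hb
        rw [List.mem_singleton] at hb; subst hb
        exact fun h => hfresh (h ▸ ha)
      · intro v hv
        by_cases hvnb : v = nb
        · subst hvnb; rw [hzero]
        · rw [PySem.Dict.getD_modify_of_ne _ _ _ hvnb]
          apply hle
          rcases List.mem_append.1 hv with hv | hv
          · exact List.mem_append.2 (Or.inl hv)
          · rcases List.mem_append.1 hv with hv | hv
            · exact List.mem_append.2 (Or.inr hv)
            · exact absurd (List.mem_singleton.1 hv) hvnb
      · intro v hv
        rcases List.mem_append.1 hv with hv | hv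
        · exact hqP v hv
        · rw [List.mem_singleton.1 hv]; exact hcs nb (List.mem_cons_self)
    · have hstep : pvKahnStep (q, indeg) nb = (q, indeg.modify nb 0 (· - 1)) := by
        simp only [pvKahnStep]; rw [if_neg hcond]
      rw [hstep]
      refine ihc q _ hnd ?_ hqP (fun c hc => hcs c (List.mem_cons_of_mem nb hc))
      intro v hv
      by_cases hvnb : v = nb
      · subst hvnb; rw [hmod]; have := hle v hv; omega
      · rw [PySem.Dict.getD_modify_of_ne _ _ _ hvnb]; exact hle v hv

theorem pv_kahn_loop (succ : PySem.Dict String (List String)) (P : List String)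
    (hsucc : ∀ u, ∀ c ∈ succ.getD u [], c ∈ P) :
    ∀ (fuel : Nat) (q out : List String) (indeg : PySem.Dict String Int),
      (out ++ q).Nodup → (∀ v ∈ out ++ q, indeg.getD v 0 ≤ 0) →
      (∀ v ∈ q, v ∈ P) → (∀ v ∈ out, v ∈ P) →
      (pvKahnLoop succ fuel q indeg out).Nodup ∧
        (∀ v ∈ pvKahnLoop succ fuel q indeg out, v ∈ P) := by
  intro fuel
  induction fuel with
  | zero =>
    intro q out indeg hnd _ _ houtP
    exact ⟨((List.nodup_append.1 hnd).1), houtP⟩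
  | succ fuel ihf =>
    intro q out indeg hnd hle hqP houtP
    cases q with
    | nil =>
      show (pvKahnLoop succ (fuel + 1) [] indeg out).Nodup ∧ _
      have : pvKahnLoop succ (fuel + 1) [] indeg out = out := rfl
      rw [this]
      rw [List.append_nil] at hnd
      exact ⟨hnd, houtP⟩
    | cons node rest =>
      have hunf : pvKahnLoop succ (fuel + 1) (node :: rest) indeg out
          = pvKahnLoop succ fuel
              ((succ.getD node []).foldl pvKahnStep (rest, indeg)).1
              ((succ.getD node []).foldl pvKahnStep (rest, indeg)).2
              (out ++ [node]) := rfl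
      rw [hunf]
      have hshift : out ++ node :: rest = (out ++ [node]) ++ rest := by
        rw [List.append_assoc]; rfl
      rw [hshift] at hnd hle
      rcases pv_kahn_inner (succ.getD node []) (out ++ [node]) rest P indeg hnd hle
          (fun v hv => hqP v (List.mem_cons_of_mem node hv)) (hsucc node) with ⟨h1, h2, h3⟩
      refine ihf _ _ _ h1 h2 h3 ?_
      intro v hv
      rcases List.mem_append.1 hv with hv | hv
      · exact houtP v hv
      · rw [List.mem_singleton.1 hv]; exact hqP node (List.mem_cons_self)

theorem pv_S_props (pc : List (String × List String)) :
    (pvS pc).Nodup ∧ ∀ v ∈ pvS pc, v ∈ pvE pc := by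
  have hqnd : ((pvE pc).filter (fun el =>
      ((pvD pc).values.foldl (fun m cs => cs.foldl (fun m c => m.modify c 0 (· + 1)) m)
        ((pvE pc).foldl (fun m el => m.insert el (0 : Int)) PySem.Dict.empty)).getD el 0 == 0)).Nodup :=
    (pv_nodup_pvElems (pvD pc)).filter _
  refine pv_kahn_loop _ (pvE pc) ?_ (pvE pc).length _ [] _ hqnd ?_ ?_ ?_
  · intro u c hc
    exact pv_children_sub_elems pc u c ((pv_succT_mem pc u c).1 hc)
  · intro v hv
    simp only [List.nil_append] at hv
    rcases List.mem_filter.1 hv with ⟨_, hcond⟩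
    rw [beq_iff_eq] at hcond
    omega
  · intro v hv
    exact (List.mem_filter.1 hv).1
  · intro v hv; simp at hv

def pvRowPart (pc : List (String × List String)) (x : String) (Q : List String) :
    PySem.Dict String Int :=
  Q.foldl (pvRowStep (pvUp pc) x) PySem.Dict.empty

def pvMval (pc : List (String × List String)) (x z : String) : Int :=
  (pvRowPart pc x (pvS pc)).getD z 0

theorem pv_row_keys (pc : List (String × List String)) (x : String) (Q : List String)
    (row : PySem.Dict String Int) (z : String)
    (hz : z ∈ (Q.foldl (pvRowStep (pvUp pc) x) row).keys) :
    z ∈ row.keys ∨ (z ∈ Q ∧ z ∈ (pvUp pc).getD x []) := by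
  induction Q generalizing row with
  | nil => exact Or.inl hz
  | cons a t ih =>
    simp only [List.foldl_cons] at hz
    rcases ih _ hz with hz' | ⟨h1, h2⟩
    · unfold pvRowStep at hz'
      by_cases hc : PySem.Set.contains ((pvUp pc).getD x []) a
      · rw [if_pos hc] at hz'
        rcases (PySem.Dict.mem_keys_insert _ _ _ _).1 hz' with rfl | hz''
        · exact Or.inr ⟨List.mem_cons_self, (PySem.Set.contains_iff _ _).1 hc⟩
        · exact Or.inl hz''
      · rw [if_neg hc] at hz'; exact Or.inl hz'
    · exact Or.inr ⟨List.mem_cons_of_mem a h1, h2⟩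

theorem pv_row_stable (pc : List (String × List String)) (x : String) (l : List String)
    (row : PySem.Dict String Int) (z : String) (hz : z ∉ l) :
    (l.foldl (pvRowStep (pvUp pc) x) row).getD z 0 = row.getD z 0 := by
  induction l generalizing row with
  | nil => rfl
  | cons a t ih =>
    simp only [List.foldl_cons]
    rw [ih _ (fun h => hz (List.mem_cons_of_mem a h))]
    unfold pvRowStep
    by_cases hc : PySem.Set.contains ((pvUp pc).getD x []) a
    · rw [if_pos hc]
      exact PySem.Dict.getD_insert_of_ne _ _ _ (fun h => hz (h ▸ List.mem_cons_self))
    · rw [if_neg hc]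

theorem pv_row_items (pc : List (String × List String)) (x : String) (hS : (pvS pc).Nodup) :
    ∀ (Q R : List String), pvS pc = Q ++ R →
      (pvRowPart pc x Q).items
        = (Q.filter (fun z => PySem.Set.contains ((pvUp pc).getD x []) z)).map
            (fun z => (z, pvMval pc x z)) := by
  intro Q
  induction Q using List.reverseRecOn with
  | nil => intro R _; rfl
  | append_singleton Q a ih =>
    intro R hQR
    rw [List.append_assoc] at hQR
    have hQ := ih (a :: R) hQR
    have hanotQ : a ∉ Q ∧ a ∉ R := by
      rw [hQR] at hS
      rcases List.nodup_append.1 hS with ⟨_, hnd2, hdisj⟩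
      exact ⟨fun ha => hdisj a ha a List.mem_cons_self rfl,
        (List.nodup_cons.1 hnd2).1⟩
    have hfold : pvRowPart pc x (Q ++ [a]) = pvRowStep (pvUp pc) x (pvRowPart pc x Q) a := by
      unfold pvRowPart; rw [List.foldl_append]; rfl
    have hmvala : pvMval pc x a
        = (pvRowStep (pvUp pc) x (pvRowPart pc x Q) a).getD a 0 := by
      unfold pvMval
      have hsplit : pvRowPart pc x (pvS pc)
          = R.foldl (pvRowStep (pvUp pc) x) (pvRowStep (pvUp pc) x (pvRowPart pc x Q) a) := by
        unfold pvRowPart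
        rw [hQR, List.foldl_append, List.singleton_append, List.foldl_cons]
      rw [hsplit, pv_row_stable pc x R _ a hanotQ.2]
    by_cases hc : PySem.Set.contains ((pvUp pc).getD x []) a
    · have hstep : pvRowStep (pvUp pc) x (pvRowPart pc x Q) a
          = (pvRowPart pc x Q).insert a
              (if x == a then 1 else -(pvRowSum (pvUp pc) a (pvRowPart pc x Q))) := by
        unfold pvRowStep; rw [if_pos hc]
      have hfreshb : (pvRowPart pc x Q).contains a = false := by
        rw [← Bool.not_eq_true, PySem.Dict.contains_iff_mem_keys]
        intro hmem
        rcases pv_row_keys pc x Q PySem.Dict.empty a (by simpa [pvRowPart] using hmem) with h | ⟨h, _⟩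
        · simp [PySem.Dict.keys, PySem.Dict.empty] at h
        · exact hanotQ.1 h
      rw [hfold, hstep, PySem.Dict.items_insert_of_not_contains _ _ hfreshb, hQ]
      rw [List.filter_append, List.map_append]
      congr 1
      rw [List.filter_cons_of_pos hc]
      simp only [List.filter_nil, List.map_cons, List.map_nil]
      congr 2
      rw [hmvala, hstep, PySem.Dict.getD_insert_self]
    · have hstep : pvRowStep (pvUp pc) x (pvRowPart pc x Q) a = pvRowPart pc x Q := by
        unfold pvRowStep; rw [if_neg hc]
      rw [hfold, hstep, hQ]
      congr 1
      rw [List.filter_append, List.filter_cons_of_neg hc]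
      simp

theorem pv_mval_eq (pc : List (String × List String)) (x : String) (hS : (pvS pc).Nodup)
    (Q R : List String) (y : String) (hQR : pvS pc = Q ++ y :: R) :
    pvMval pc x y
      = if PySem.Set.contains ((pvUp pc).getD x []) y then
          (if x == y then 1 else -(pvRowSum (pvUp pc) y (pvRowPart pc x Q)))
        else 0 := by
  have hynotR : y ∉ R := by
    rw [hQR] at hS
    rcases List.nodup_append.1 hS with ⟨_, hnd2, _⟩
    exact (List.nodup_cons.1 hnd2).1
  have h1 : pvMval pc x y = (pvRowStep (pvUp pc) x (pvRowPart pc x Q) y).getD y 0 := by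
    unfold pvMval
    have hsplit : pvRowPart pc x (pvS pc)
        = R.foldl (pvRowStep (pvUp pc) x) (pvRowStep (pvUp pc) x (pvRowPart pc x Q) y) := by
      unfold pvRowPart
      rw [hQR, List.foldl_append, List.foldl_cons]
    rw [hsplit, pv_row_stable pc x R _ y hynotR]
  rw [h1]
  by_cases hc : PySem.Set.contains ((pvUp pc).getD x []) y
  · rw [if_pos hc]
    unfold pvRowStep
    rw [if_pos hc, PySem.Dict.getD_insert_self]
  · rw [if_neg hc]
    unfold pvRowStep
    rw [if_neg hc]
    apply PySem.Dict.getD_of_not_contains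
    rw [← Bool.not_eq_true, PySem.Dict.contains_iff_mem_keys]
    intro hmem
    rcases pv_row_keys pc x Q PySem.Dict.empty y (by simpa [pvRowPart] using hmem) with h | ⟨_, h⟩
    · simp [PySem.Dict.keys, PySem.Dict.empty] at h
    · exact hc ((PySem.Set.contains_iff _ _).2 h)

theorem pv_sum_map_ite_zero' {α : Type} (l : List α) (q : α → Prop) [DecidablePred q]
    (g : α → Int) :
    (l.map (fun z => if q z then g z else 0)).sum
      = ((l.filter (fun z => decide (q z))).map g).sum := by
  induction l with
  | nil => rfl
  | cons b t ih =>
    simp only [List.map_cons, List.sum_cons, List.filter_cons]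
    by_cases h : q b <;> simp [h, ih]

-- A's inner loop body, with the let-bound zeta named
def pvAStep (pc : List (String × List String)) (y : String)
    (m : PySem.Dict (String × String) Int) (x : String) : PySem.Dict (String × String) Int :=
  if !PySem.Set.contains ((pvZeta pc).getD x []) y then m.insert (x, y) 0
  else if x == y then m.insert (x, y) 1
  else
    m.insert (x, y) (-(((pvZeta pc).getD x []).foldl (fun s z =>
      if z != y && PySem.Set.contains ((pvZeta pc).getD z []) y then s + m.getD (x, z) 0
      else s) (0 : Int)))

def pvGrid (v : String → String → Int) (S Q : List String) :
    PySem.Dict (String × String) Int :=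
  Q.foldl (fun m y => S.foldl (fun m x => m.insert (x, y) (v x y)) m) PySem.Dict.empty

theorem pv_grid_inner_getD (v : String → String → Int) (S : List String) (y a b : String)
    (m : PySem.Dict (String × String) Int) :
    (S.foldl (fun m x => m.insert (x, y) (v x y)) m).getD (a, b) 0
      = if b = y ∧ a ∈ S then v a y else m.getD (a, b) 0 := by
  induction S generalizing m with
  | nil => simp
  | cons x0 t ih =>
    simp only [List.foldl_cons, ih, PySem.Dict.getD_insert, List.mem_cons]
    by_cases hb : b = y <;> by_cases hat : a ∈ t <;> by_cases hax : a = x0 <;>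
      simp [hb, hat, hax, Prod.ext_iff]

theorem pv_grid_getD_gen (v : String → String → Int) (S : List String) (a b : String) :
    ∀ (Q : List String) (m : PySem.Dict (String × String) Int),
      (Q.foldl (fun m y => S.foldl (fun m x => m.insert (x, y) (v x y)) m) m).getD (a, b) 0
        = if b ∈ Q ∧ a ∈ S then v a b else m.getD (a, b) 0 := by
  intro Q
  induction Q with
  | nil => simp
  | cons y t ih =>
    intro m
    simp only [List.foldl_cons, ih, pv_grid_inner_getD, List.mem_cons]
    by_cases h1 : b ∈ t <;> by_cases h2 : a ∈ S <;> by_cases h3 : b = y <;>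
      simp [h1, h2, h3]

theorem pv_grid_getD (v : String → String → Int) (S Q : List String) (a b : String) :
    (pvGrid v S Q).getD (a, b) 0 = if b ∈ Q ∧ a ∈ S then v a b else 0 := by
  unfold pvGrid
  rw [pv_grid_getD_gen]
  by_cases h : b ∈ Q ∧ a ∈ S <;> simp [h, PySem.Dict.getD_empty]

theorem pv_grid_congr (v w : String → String → Int) (S : List String) :
    ∀ (Q : List String) (m : PySem.Dict (String × String) Int),
      (∀ x ∈ S, ∀ y ∈ Q, v x y = w x y) →
      Q.foldl (fun m y => S.foldl (fun m x => m.insert (x, y) (v x y)) m) m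
        = Q.foldl (fun m y => S.foldl (fun m x => m.insert (x, y) (w x y)) m) m := by
  intro Q
  induction Q with
  | nil => intro m _; rfl
  | cons y t ih =>
    intro m hvw
    simp only [List.foldl_cons]
    have hinner : ∀ (l : List String) (m : PySem.Dict (String × String) Int),
        (∀ x ∈ l, v x y = w x y) →
        l.foldl (fun m x => m.insert (x, y) (v x y)) m
          = l.foldl (fun m x => m.insert (x, y) (w x y)) m := by
      intro l
      induction l with
      | nil => intro m _; rfl
      | cons x0 t0 ih0 =>
        intro m hl
        simp only [List.foldl_cons]
        rw [hl x0 (List.mem_cons_self), ih0 _ (fun x hx => hl x (List.mem_cons_of_mem x0 hx))]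
    rw [hinner S m (fun x hx => hvw x hx y (List.mem_cons_self))]
    exact ih _ (fun x hx y' hy' => hvw x hx y' (List.mem_cons_of_mem y hy'))

theorem pv_zeta_up_bridge (pc : List (String × List String)) (a : String) (ha : a ∈ pvS pc)
    (w : String) :
    (PySem.Set.contains ((pvZeta pc).getD a []) w = true
      ↔ PySem.Set.contains ((pvUp pc).getD a []) w = true) := by
  have haE : a ∈ pvE pc := (pv_S_props pc).2 a ha
  rw [PySem.Set.contains_iff, PySem.Set.contains_iff, pv_zeta_mem pc a haE w,
    pv_up_mem pc a ha w]

theorem pv_val_eq (pc : List (String × List String)) (hS : (pvS pc).Nodup)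
    (Q R : List String) (y : String) (hQR : pvS pc = Q ++ y :: R)
    (x : String) (hx : x ∈ pvS pc) (m : PySem.Dict (String × String) Int)
    (hm : ∀ a z, z ≠ y → m.getD (a, z) 0
        = if z ∈ Q ∧ a ∈ pvS pc then pvMval pc a z else 0) :
    pvAStep pc y m x = m.insert (x, y) (pvMval pc x y) := by
  have hynQ : y ∉ Q := by
    rw [hQR] at hS
    rcases List.nodup_append.1 hS with ⟨_, _, hdisj⟩
    intro hyQ
    exact hdisj y hyQ y List.mem_cons_self rfl
  have hQnd : Q.Nodup := by
    rw [hQR] at hS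
    exact (List.nodup_append.1 hS).1
  unfold pvAStep
  by_cases hcz : PySem.Set.contains ((pvZeta pc).getD x []) y = true
  · rw [if_neg (by rw [hcz]; decide)]
    have hcu : PySem.Set.contains ((pvUp pc).getD x []) y = true :=
      (pv_zeta_up_bridge pc x hx y).1 hcz
    by_cases hxy : (x == y) = true
    · rw [if_pos hxy, pv_mval_eq pc x hS Q R y hQR, if_pos hcu, if_pos hxy]
    · rw [if_neg hxy, pv_mval_eq pc x hS Q R y hQR, if_pos hcu, if_neg hxy]
      congr 1
      -- A's accumulated sum equals B's row sum
      rw [pv_foldl_if_add, zero_add, pvRowSum, pv_foldl_if_add, zero_add]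
      rw [pv_row_items pc x hS Q (y :: R) hQR]
      rw [List.filter_map, List.map_map]
      have hmapA : ((((pvZeta pc).getD x []).filter (fun z =>
            z != y && PySem.Set.contains ((pvZeta pc).getD z []) y)).map
              (fun z => m.getD (x, z) 0))
          = ((((pvZeta pc).getD x []).filter (fun z =>
            z != y && PySem.Set.contains ((pvZeta pc).getD z []) y)).map
              (fun z => if z ∈ Q then pvMval pc x z else 0)) := by
        apply List.map_congr_left
        intro z hz
        rcases List.mem_filter.1 hz with ⟨_, hcond⟩
        rw [Bool.and_eq_true] at hcond
        rcases hcond with ⟨hne, _⟩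
        rw [hm x z (bne_iff_ne.1 hne)]
        by_cases hzQ : z ∈ Q
        · simp [hzQ, hx]
        · simp [hzQ]
      rw [hmapA, pv_sum_map_ite_zero']
      simp only [Function.comp_def]
      rw [neg_inj]
      apply pv_sum_map_eq_of_mem_iff
      · exact ((pv_nodup_zeta pc x).filter _).filter _
      · exact (hQnd.filter _).filter _
      · intro z
        simp only [List.mem_filter, Bool.and_eq_true, bne_iff_ne, ne_eq, decide_eq_true_eq]
        constructor
        · rintro ⟨⟨hzZ, hne, hyZ⟩, hzQ⟩
          have hzS : z ∈ pvS pc := by rw [hQR]; exact List.mem_append.2 (Or.inl hzQ)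
          refine ⟨⟨hzQ, ?_⟩, ?_⟩
          · exact (pv_zeta_up_bridge pc x hx z).1 ((PySem.Set.contains_iff _ _).2 hzZ)
          · exact (pv_zeta_up_bridge pc z hzS y).1 hyZ
        · rintro ⟨⟨hzQ, hzU⟩, hyU⟩
          have hzS : z ∈ pvS pc := by rw [hQR]; exact List.mem_append.2 (Or.inl hzQ)
          refine ⟨⟨?_, ?_, ?_⟩, hzQ⟩
          · exact (PySem.Set.contains_iff _ _).1 ((pv_zeta_up_bridge pc x hx z).2 hzU)
          · intro hzy; exact hynQ (hzy ▸ hzQ)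
          · exact (pv_zeta_up_bridge pc z hzS y).2 hyU
  · have hczf : PySem.Set.contains ((pvZeta pc).getD x []) y = false :=
      Bool.eq_false_iff.2 hcz
    rw [if_pos (by rw [hczf]; rfl)]
    have hcuf : PySem.Set.contains ((pvUp pc).getD x []) y = false :=
      Bool.eq_false_iff.2 (fun h => hcz ((pv_zeta_up_bridge pc x hx y).2 h))
    rw [pv_mval_eq pc x hS Q R y hQR, hcuf]
    simp

theorem pv_inner_eq (pc : List (String × List String)) (hS : (pvS pc).Nodup)
    (Q R : List String) (y : String) (hQR : pvS pc = Q ++ y :: R) :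
    ∀ (xs : List String) (m : PySem.Dict (String × String) Int),
      (∀ x ∈ xs, x ∈ pvS pc) →
      (∀ a z, z ≠ y → m.getD (a, z) 0
          = if z ∈ Q ∧ a ∈ pvS pc then pvMval pc a z else 0) →
      xs.foldl (pvAStep pc y) m
        = xs.foldl (fun m x => m.insert (x, y) (pvMval pc x y)) m := by
  intro xs
  induction xs with
  | nil => intro m _ _; rfl
  | cons x t ih =>
    intro m hxs hm
    simp only [List.foldl_cons]
    rw [pv_val_eq pc hS Q R y hQR x (hxs x List.mem_cons_self) m hm]
    apply ih
    · exact fun x' hx' => hxs x' (List.mem_cons_of_mem x hx')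
    · intro a z hz
      rw [PySem.Dict.getD_insert_of_ne _ _ _ (fun h => hz (Prod.ext_iff.1 h).2)]
      exact hm a z hz

theorem pv_outer (pc : List (String × List String)) (hS : (pvS pc).Nodup) :
    ∀ (R Q : List String), pvS pc = Q ++ R →
      R.foldl (fun m y => (pvS pc).foldl (pvAStep pc y) m) (pvGrid (pvMval pc) (pvS pc) Q)
        = pvGrid (pvMval pc) (pvS pc) (Q ++ R) := by
  intro R
  induction R with
  | nil => intro Q h; simp
  | cons y R' ih =>
    intro Q hQR
    simp only [List.foldl_cons]
    have hstep : (pvS pc).foldl (pvAStep pc y) (pvGrid (pvMval pc) (pvS pc) Q)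
        = pvGrid (pvMval pc) (pvS pc) (Q ++ [y]) := by
      rw [pv_inner_eq pc hS Q R' y hQR (pvS pc) _ (fun x hx => hx)]
      · show _ = (Q ++ [y]).foldl _ PySem.Dict.empty
        rw [List.foldl_append]
        rfl
      · intro a z hz
        rw [pv_grid_getD]
    rw [hstep]
    have hQR' : pvS pc = (Q ++ [y]) ++ R' := by rw [List.append_assoc]; exact hQR
    rw [ih (Q ++ [y]) hQR']
    rw [List.append_assoc]
    rfl

def pvRows (pc : List (String × List String)) :
    PySem.Dict String (PySem.Dict String Int) :=
  (pvS pc).foldl (fun rs x =>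
    rs.insert x ((pvS pc).foldl (pvRowStep (pvUp pc) x) PySem.Dict.empty)) PySem.Dict.empty

theorem pv_rows_getD (pc : List (String × List String)) (x : String) (hx : x ∈ pvS pc) :
    (pvRows pc).getD x PySem.Dict.empty = pvRowPart pc x (pvS pc) := by
  unfold pvRows
  rw [pv_getD_foldl_insert_fn (pvS pc)
    (fun x => (pvS pc).foldl (pvRowStep (pvUp pc) x) PySem.Dict.empty), if_pos hx]
  rfl

theorem pv_main (pc : List (String × List String)) :
    calculate_mobius_function pc = calculate_mobius_function_alt pc := by
  rcases pv_S_props pc with ⟨hS, _⟩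
  have hA : calculate_mobius_function pc
      = ((pvS pc).foldl (fun m y => (pvS pc).foldl (pvAStep pc y) m)
          PySem.Dict.empty).items.map (fun p => (p.1.1, p.1.2, p.2)) := rfl
  have hB : calculate_mobius_function_alt pc
      = ((pvS pc).foldl (fun m y => (pvS pc).foldl (fun m x =>
            m.insert (x, y) (((pvRows pc).getD x PySem.Dict.empty).getD y 0)) m)
          PySem.Dict.empty).items.map (fun p => (p.1.1, p.1.2, p.2)) := rfl
  rw [hA, hB]
  have hmemo : (pvS pc).foldl (fun m y => (pvS pc).foldl (pvAStep pc y) m) PySem.Dict.empty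
      = pvGrid (pvMval pc) (pvS pc) (pvS pc) := by
    have hout := pv_outer pc hS (pvS pc) [] rfl
    rw [show pvGrid (pvMval pc) (pvS pc) [] = PySem.Dict.empty from rfl,
      List.nil_append] at hout
    exact hout
  have hres : (pvS pc).foldl (fun m y => (pvS pc).foldl (fun m x =>
        m.insert (x, y) (((pvRows pc).getD x PySem.Dict.empty).getD y 0)) m) PySem.Dict.empty
      = pvGrid (pvMval pc) (pvS pc) (pvS pc) := by
    have hcongr := pv_grid_congr (fun x y => ((pvRows pc).getD x PySem.Dict.empty).getD y 0)
      (pvMval pc) (pvS pc) (pvS pc) PySem.Dict.empty ?_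
    · exact hcongr
    · intro x hx y _
      show ((pvRows pc).getD x PySem.Dict.empty).getD y 0 = pvMval pc x y
      rw [pv_rows_getD pc x hx]
      rfl
  rw [hmemo, hres]

-- ===== VERDICT (by name: the statement is the Claim_ definition above) =====
theorem calculate_mobius_function_spec : Claim_equal_calculate_mobius_function := by
  intro pc _ _
  show _ = _
  exact pv_main pc
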